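-- pv_equiv track=rewrite | github.com/AndreCI/Soda4LA | Models/note_model.py | note_to_int
-- ===== SOURCE A (Python) =====
-- _note_dict = {"C": 0, "D": 2, "E": 4, "F": 5, "G": 7, "A": 9, "B": 11}
--
-- def is_valid_note(note):
--     """Return True if note is in a recognised format. False if not."""
--     if note[0] not in _note_dict:
--         return False
--     for post in note[1:]:
--         if post != "B" and post != "#":
--             return False
--     return True
--
-- def note_to_int(note, octave):
--     """Convert notes in the form of C, C#, Cb, C##, etc. to an integer in the
--     range of 0-11.
--     Throw a ValueError exception if the note format is not recognised.
--     """
--     if is_valid_note(note):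
--         val = _note_dict[note[0]]
--     else:
--         raise ValueError("Unknown note format '%s'" % note)
--
--     # Check for '#' and 'b' postfixes
--     for post in note[1:]:
--         if post == "B":
--             val -= 1
--         elif post == "#":
--             val += 1
--     return val % 12 + octave * 12
-- ===== SOURCE B (Python) =====
-- _base = {"C": 0, "D": 2, "E": 4, "F": 5, "G": 7, "A": 9, "B": 11}
--
-- def _pitch(note):
--     """Raw pitch of a note name, by recursion peeling accidentals off the END.
--     Validation and accidental adjustment happen in one recursive descent."""
--     if len(note) == 1:
--         if note in _base:
--             return _base[note]
--         raise ValueError("Unknown note format '%s'" % note)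
--     if note.endswith("#"):
--         return _pitch(note[:-1]) + 1
--     if note.endswith("B"):
--         return _pitch(note[:-1]) - 1
--     raise ValueError("Unknown note format '%s'" % note)
--
-- def note_to_int(note, octave):
--     """Convert notes like C, C#, Cb, C## to an integer in 0-11 plus octave*12.
--     Raise ValueError if the note format is not recognised."""
--     return _pitch(note) % 12 + octave * 12
-- ===== Notes on version B (the rewrite author's own statement) =====
-- stated objective: alternative
-- what changed: Replaces A's two forward scans (a validation loop, then an accumulation loop) with one recursive descent that peels accidentals off the END of the string, fusing validation and tally into a single backward pass.
import Mathlib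
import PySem

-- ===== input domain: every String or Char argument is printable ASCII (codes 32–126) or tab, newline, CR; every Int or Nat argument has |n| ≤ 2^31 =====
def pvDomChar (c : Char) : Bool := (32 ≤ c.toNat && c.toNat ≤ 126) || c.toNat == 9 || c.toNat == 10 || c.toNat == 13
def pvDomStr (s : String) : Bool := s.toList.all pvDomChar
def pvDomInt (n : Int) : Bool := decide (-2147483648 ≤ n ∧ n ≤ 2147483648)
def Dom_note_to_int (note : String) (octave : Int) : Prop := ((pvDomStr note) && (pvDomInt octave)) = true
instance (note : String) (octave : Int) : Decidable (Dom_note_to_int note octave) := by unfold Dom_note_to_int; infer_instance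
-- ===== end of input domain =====

-- B fuses A's two forward scans into one recursive descent peeling accidentals
-- off the end of the string (objective: alternative decomposition, same cost).


-- ===== PORT A =====
-- _note_dict, an insertion-order dict with Char keys (Python's 1-char strings)
def pvNoteDict : PySem.Dict Char Int :=
  (((((((PySem.Dict.empty).insert 'C' 0).insert 'D' 2).insert 'E' 4).insert 'F' 5).insert
    'G' 7).insert 'A' 9).insert 'B' 11

-- is_valid_note; on the empty string Python raises IndexError (excluded by Pre_), false here
def is_valid_note (note : String) : Bool :=
  match note.toList with
  | [] => false
  | c :: rest =>
    if (pvNoteDict.get? c).isNone then false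
    else rest.all (fun post => post == 'B' || post == '#')

-- port of A; on invalid notes Python raises (ValueError/IndexError), excluded by Pre_, 0 here
def note_to_int (note : String) (octave : Int) : Int :=
  if is_valid_note note then
    let val := (pvNoteDict.get? (note.toList.headD ' ')).getD 0
    let val := (note.toList.drop 1).foldl
      (fun v post => if post == 'B' then v - 1 else if post == '#' then v + 1 else v) val
    PySem.Int.mod val 12 + octave * 12
  else 0

-- ===== PORT B =====
-- Source B's _base lookup of a single-character note name
def pvBase? (c : Char) : Option Int :=
  match c with
  | 'C' => some 0 | 'D' => some 2 | 'E' => some 4 | 'F' => some 5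
  | 'G' => some 7 | 'A' => some 9 | 'B' => some 11 | _ => none

-- Source B's recursive _pitch, over the REVERSED character list (peeling note[-1]
-- = head of the reversed list); none wherever Python raises ValueError
def pvPitchRev? : List Char → Option Int
  | [] => none
  | c :: rest =>
    if rest.isEmpty then pvBase? c
    else if c = '#' then (pvPitchRev? rest).map (· + 1)
    else if c = 'B' then (pvPitchRev? rest).map (· - 1)
    else none

-- port of B; where Source B raises ValueError (excluded by Pre_), 0 here
def note_to_int_alt (note : String) (octave : Int) : Int :=
  match pvPitchRev? note.toList.reverse with
  | some v => PySem.Int.mod v 12 + octave * 12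
  | none => 0

-- ===== PRECONDITION & SPEC =====
-- Pre_ = exactly the notes A accepts: nonempty, first char a note name, tail only 'B'/'#'
-- (elsewhere A raises IndexError or ValueError and returns no value).
def Pre_note_to_int (note : String) (octave : Int) : Prop :=
  ((!note.toList.isEmpty) &&
   ['C', 'D', 'E', 'F', 'G', 'A', 'B'].contains (note.toList.headD ' ') &&
   (note.toList.drop 1).all (fun ch => ch == 'B' || ch == '#')) = true
instance (note : String) (octave : Int) : Decidable (Pre_note_to_int note octave) := by
  unfold Pre_note_to_int; infer_instance

def pvWitness_note_to_int : String × Int := ("C", 0)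

def Spec_note_to_int (note : String) (octave : Int) (out : Int) : Prop := out = note_to_int_alt note octave
instance (note : String) (octave : Int) (out : Int) : Decidable (Spec_note_to_int note octave out) := by unfold Spec_note_to_int; infer_instance

-- ===== CLAIM (what is proved, stated in full; the proofs are below) =====
def Claim_equal_note_to_int : Prop := ∀ (note : String) (octave : Int), Dom_note_to_int note octave → Pre_note_to_int note octave → Spec_note_to_int note octave (note_to_int note octave)

-- ===== LEMMAS AND PROOFS =====

-- A's accumulation loop as a closed-form tally over the tail
lemma fold_count (rest : List Char) (v : Int)
    (h : ∀ ch ∈ rest, ch = 'B' ∨ ch = '#') :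
    rest.foldl (fun v post => if post = 'B' then v - 1 else if post = '#' then v + 1 else v) v
      = v + (rest.count '#' : Int) - (rest.count 'B' : Int) := by
  induction rest generalizing v with
  | nil => simp
  | cons ch rest ih =>
    have hrest : ∀ c ∈ rest, c = 'B' ∨ c = '#' := fun c hc => h c (List.mem_cons_of_mem _ hc)
    rcases h ch (List.mem_cons_self ..) with rfl | rfl <;> rw [List.foldl_cons, ih _ hrest] <;>
      simp <;> omega

-- B's recursion as the same closed-form tally
lemma pitch_append (l : List Char) (c : Char)
    (h : ∀ ch ∈ l, ch = 'B' ∨ ch = '#') :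
    pvPitchRev? (l ++ [c]) =
      (pvBase? c).map (fun b => b + (l.count '#' : Int) - (l.count 'B' : Int)) := by
  induction l with
  | nil => cases hb : pvBase? c <;> simp [pvPitchRev?, hb]
  | cons ch l ih =>
    have hl : ∀ c ∈ l, c = 'B' ∨ c = '#' := fun c hc => h c (List.mem_cons_of_mem _ hc)
    have hne : ((l ++ [c]).isEmpty) = false := by simp
    rcases h ch (List.mem_cons_self ..) with rfl | rfl <;>
      · rw [List.cons_append, pvPitchRev?, hne, ih hl]
        cases hb : pvBase? c <;> simp [hb] <;> omega

-- ===== VERDICT (by name: the statement is the Claim_ definition above) =====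

theorem note_to_int_spec : Claim_equal_note_to_int := by
  intro note octave _ hpre
  unfold Spec_note_to_int Pre_note_to_int at *
  simp only [Bool.and_eq_true, Bool.not_eq_eq_eq_not, Bool.not_true, List.contains_eq_mem,
    decide_eq_true_eq, List.all_eq_true, List.isEmpty_eq_false_iff, beq_iff_eq,
    Bool.or_eq_true] at hpre
  obtain ⟨⟨hne, hc⟩, hrest⟩ := hpre
  unfold note_to_int note_to_int_alt is_valid_note
  rcases hl : note.toList with _ | ⟨c, rest⟩
  · exact absurd hl hne
  · simp only [hl, List.headD_cons, List.drop_succ_cons, List.drop_zero] at hc hrest ⊢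
    have hall : rest.all (fun post => post == 'B' || post == '#') = true := by
      simp only [List.all_eq_true]
      intro ch hch
      rcases hrest ch hch with rfl | rfl <;> simp
    have hrev : ∀ ch ∈ rest.reverse, ch = 'B' ∨ ch = '#' := by
      intro ch hch; exact hrest ch (List.mem_reverse.mp hch)
    rw [List.reverse_cons, pitch_append _ _ hrev]
    fin_cases hc <;>
      simp [hall, pvNoteDict, pvBase?, PySem.Dict.get?, PySem.Dict.insert, PySem.Dict.empty,
        List.count_reverse] <;>
      rw [fold_count rest _ hrest] <;> omega
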